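-- pv_equiv track=rewrite | github.com/cedriccaille/CSCI_1133 | 10thWeek/hw10/hw10.py | bigram_count
-- ===== SOURCE A (Python) =====
-- def bigram_count(string):
--     '''
--     Purpose: Count all of the bigrams in a given string
--     Input Parameter(s): String
--     Return Value: Return dictionary of dictionaries that contains bigrams and the counts of their occurrence
--     '''
--     lst = string.split()
--     out_dict = {}
--     for i in range(len(lst)-1):
--         first = lst[i]
--         second = lst[i+1]
--         if first in out_dict.keys():
--             if second in out_dict[first].keys():
--                 out_dict[first][second] += 1
--             else:
--                 out_dict[first][second] = 1
--         else:
--             out_dict[first] = {}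
--             out_dict[first][second] = 1
--     return out_dict
-- ===== SOURCE B (Python) =====
-- def bigram_count(string):
--     '''
--     Purpose: Count all of the bigrams in a given string
--     Input Parameter(s): String
--     Return Value: Return dictionary of dictionaries that contains bigrams and the counts of their occurrence
--     '''
--     words = string.split()
--     pairs = list(zip(words, words[1:]))
--     firsts = dict.fromkeys(first for first, _ in pairs)
--     return {first: {second: pairs.count((first, second))
--                     for _, second in dict.fromkeys(p for p in pairs if p[0] == first)}
--             for first in firsts}
-- ===== Notes on version B (the rewrite author's own statement) =====
-- stated objective: alternative
-- what changed: A's single interleaved loop that builds and mutates a nested dict per bigram is replaced by a declarative comprehension: deduplicate the first words (dict.fromkeys), and for each one build the inner dict from the deduplicated matching pairs with their pairs.count occurrence counts.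
import Mathlib
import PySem

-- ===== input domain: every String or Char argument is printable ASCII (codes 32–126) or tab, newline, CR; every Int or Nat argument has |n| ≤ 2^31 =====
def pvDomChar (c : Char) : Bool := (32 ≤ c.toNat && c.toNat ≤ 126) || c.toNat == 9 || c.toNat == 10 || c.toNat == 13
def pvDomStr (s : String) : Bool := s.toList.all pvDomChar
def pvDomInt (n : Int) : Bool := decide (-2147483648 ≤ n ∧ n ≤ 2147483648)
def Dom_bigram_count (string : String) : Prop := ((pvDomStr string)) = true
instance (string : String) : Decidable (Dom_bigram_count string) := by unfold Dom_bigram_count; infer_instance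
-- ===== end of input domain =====

-- B replaces A's interleaved counting-and-nesting loop by a declarative comprehension:
-- deduplicate the first words, and for each of them build the inner dict from the
-- deduplicated matching pairs with pairs.count — a different (loop-free) decomposition,
-- not faster, chosen as an alternative of similar size.


-- ===== PORT A =====
-- the body of A's for-loop (one step of the nested-dict build)
def bigramStepA (d : PySem.Dict String (PySem.Dict String Int)) (first second : String) :
    PySem.Dict String (PySem.Dict String Int) :=
  if d.contains first then
    -- out_dict[first] is guarded by the contains check, so getD with a default is exact
    let inner := d.getD first PySem.Dict.empty
    if inner.contains second then
      d.insert first (inner.insert second (inner.getD second 0 + 1))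
    else
      d.insert first (inner.insert second 1)
  else
    d.insert first (PySem.Dict.empty.insert second 1)

def bigram_count (string : String) : List (String × List (String × Int)) :=
  let lst := PySem.Str.split₀ string
  let out :=
    (PySem.List.pyRange 0 ((lst.length : Int) - 1) 1).foldl
      (fun d i =>
        -- lst[i] and lst[i+1] are in range for every i of the loop, so pyGetD is exact
        bigramStepA d (PySem.List.pyGetD lst i "") (PySem.List.pyGetD lst (i + 1) ""))
      PySem.Dict.empty
  out.items.map (fun p => (p.1, p.2.items))

-- ===== PORT B =====
-- dict comprehensions whose key lists are deduplicated (hence distinct) are ported as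
-- List.map producing the items in comprehension order
def bigram_count_alt (string : String) : List (String × List (String × Int)) :=
  let words := PySem.Str.split₀ string
  let pairs := words.zip (PySem.List.slice words (some 1) none)
  let firsts := PySem.List.dedup (pairs.map (fun p => p.1))
  firsts.map (fun f =>
    (f, (PySem.List.dedup (pairs.filter (fun p => p.1 == f))).map
          (fun p => (p.2, (pairs.count p : Int)))))

-- ===== PRECONDITION & SPEC =====
def Spec_bigram_count (string : String) (out : List (String × List (String × Int))) : Prop := out = bigram_count_alt string
instance (string : String) (out : List (String × List (String × Int))) : Decidable (Spec_bigram_count string out) := by unfold Spec_bigram_count; infer_instance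

-- ===== CLAIM (what is proved, stated in full; the proofs are below) =====
def Claim_equal_bigram_count : Prop := ∀ (string : String), Dom_bigram_count string → Spec_bigram_count string (bigram_count string)

-- ===== LEMMAS AND PROOFS =====

def innerL (ps : List (String × String)) (f : String) : List (String × Int) :=
  (PySem.List.dedup (ps.filter (fun p => p.1 == f))).map (fun p => (p.2, (ps.count p : Int)))

-- canonical closed form of the nested dict built from a pair list
def canonD (ps : List (String × String)) : PySem.Dict String (PySem.Dict String Int) :=
  PySem.Dict.mk ((PySem.List.dedup (ps.map (fun p => p.1))).map (fun f => (f, PySem.Dict.mk (innerL ps f))))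

theorem dedup_snoc {α : Type} [BEq α] [LawfulBEq α] (xs : List α) (x : α) :
    PySem.List.dedup (xs ++ [x]) =
      if x ∈ xs then PySem.List.dedup xs else PySem.List.dedup xs ++ [x] := by
  have h : PySem.List.dedup (xs ++ [x]) = PySem.Set.add (PySem.List.dedup xs) x := by
    simp [PySem.List.dedup_eq_ofList, PySem.Set.ofList_eq_foldl, List.foldl_append]
  rw [h, PySem.Set.add]
  by_cases hx : x ∈ xs
  · simp [PySem.Set.contains, hx]
  · simp [PySem.Set.contains, hx]

theorem fst_of_mem_filter {ps : List (String × String)} {f : String} {q : String × String}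
    (h : q ∈ ps.filter (fun p => p.1 == f)) : q.1 = f := by
  simp [List.mem_filter] at h; exact h.2

theorem count_snoc_ne {ps : List (String × String)} {p q : String × String} (h : q ≠ p) :
    (ps ++ [p]).count q = ps.count q := by
  have h' : ¬ (p = q) := fun e => h e.symm
  simp [List.count_append, h']

theorem innerL_snoc_ne {ps : List (String × String)} {p : String × String} {f : String}
    (h : p.1 ≠ f) : innerL (ps ++ [p]) f = innerL ps f := by
  unfold innerL
  rw [List.filter_append]
  have : List.filter (fun q => q.1 == f) [p] = [] := by simp [h]
  rw [this, List.append_nil]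
  apply List.map_congr_left
  intro q hq
  have hq1 : q.1 = f := fst_of_mem_filter ((PySem.List.mem_dedup _ _).mp hq)
  have : q ≠ p := by intro e; exact h (by rw [← e, hq1])
  rw [count_snoc_ne this]

theorem canonD_keys_nodup (ps : List (String × String)) : (canonD ps).keys.Nodup := by
  have h : (canonD ps).keys = PySem.List.dedup (ps.map (fun p => p.1)) := by
    simp [canonD, PySem.Dict.keys, List.map_map, Function.comp_def]
  rw [h]; exact PySem.List.nodup_dedup _

theorem contains_canonD (ps : List (String × String)) (f : String) :
    (canonD ps).contains f = decide (f ∈ ps.map (fun p => p.1)) := by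
  show (PySem.Dict.mk _).contains f = _
  rw [PySem.Dict.contains_mk, List.any_map]
  simp only [Function.comp_def]
  by_cases hf : f ∈ ps.map (fun p => p.1)
  · simp only [decide_eq_true hf]
    rw [List.any_eq_true]
    exact ⟨f, (PySem.List.mem_dedup _ _).mpr hf, by simp⟩
  · simp only [decide_eq_false hf]
    rw [List.any_eq_false]
    intro x hx e
    exact hf ((eq_of_beq e) ▸ (PySem.List.mem_dedup _ _).mp hx)

theorem getD_canonD {ps : List (String × String)} {f : String}
    (h : f ∈ ps.map (fun p => p.1)) :
    (canonD ps).getD f PySem.Dict.empty = PySem.Dict.mk (innerL ps f) := by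
  apply PySem.Dict.getD_of_mem_items _ _ (canonD_keys_nodup ps)
  show (f, PySem.Dict.mk (innerL ps f)) ∈ List.map _ _
  exact List.mem_map_of_mem ((PySem.List.mem_dedup _ _).mpr h)

theorem innerL_keys_nodup (ps : List (String × String)) (f : String) :
    ((innerL ps f).map (fun p => p.1)).Nodup := by
  unfold innerL
  rw [List.map_map]
  simp only [Function.comp_def]
  apply List.Nodup.map_on _ (PySem.List.nodup_dedup _)
  intro x hx y hy hxy
  have hx1 := fst_of_mem_filter ((PySem.List.mem_dedup _ _).mp hx)
  have hy1 := fst_of_mem_filter ((PySem.List.mem_dedup _ _).mp hy)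
  exact Prod.ext (hx1.trans hy1.symm) hxy

theorem inner_contains (ps : List (String × String)) (f s : String) :
    (PySem.Dict.mk (innerL ps f)).contains s = decide ((f, s) ∈ ps) := by
  rw [PySem.Dict.contains_mk]
  unfold innerL
  rw [List.any_map]
  simp only [Function.comp_def]
  by_cases h : (f, s) ∈ ps
  · simp only [decide_eq_true h]
    rw [List.any_eq_true]
    exact ⟨(f, s), (PySem.List.mem_dedup _ _).mpr (List.mem_filter.mpr ⟨h, by simp⟩), by simp⟩
  · simp only [decide_eq_false h]
    rw [List.any_eq_false]
    intro q hq e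
    have hq' := (PySem.List.mem_dedup _ _).mp hq
    exact h ((Prod.ext (fst_of_mem_filter hq') (eq_of_beq e) : q = (f, s)) ▸ (List.mem_filter.mp hq').1)

theorem inner_getD {ps : List (String × String)} {f s : String} (h : (f, s) ∈ ps) :
    (PySem.Dict.mk (innerL ps f)).getD s 0 = (ps.count (f, s) : Int) := by
  apply PySem.Dict.getD_of_mem_items
  · show (s, (ps.count (f, s) : Int)) ∈ List.map _ _
    exact List.mem_map_of_mem ((PySem.List.mem_dedup _ _).mpr (List.mem_filter.mpr ⟨h, by simp⟩))
  · show (List.map _ _).Nodup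
    exact innerL_keys_nodup ps f

theorem step_canonD (ps : List (String × String)) (p : String × String) :
    bigramStepA (canonD ps) p.1 p.2 = canonD (ps ++ [p]) := by
  obtain ⟨f, s⟩ := p
  unfold bigramStepA
  rw [contains_canonD]
  by_cases hf : f ∈ ps.map (fun p => p.1)
  · rw [getD_canonD hf]
    simp only [decide_eq_true hf, if_true]
    rw [inner_contains]
    have hK : PySem.List.dedup (List.map (fun p => p.1) (ps ++ [(f, s)])) =
        PySem.List.dedup (List.map (fun p => p.1) ps) := by
      rw [List.map_append]
      show PySem.List.dedup (_ ++ [f]) = _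
      rw [dedup_snoc, if_pos hf]
    by_cases hs : (f, s) ∈ ps
    · -- increment an existing bigram
      simp only [decide_eq_true hs, if_true, inner_getD hs]
      have hmemf : (f, s) ∈ List.filter (fun p => p.1 == f) ps := List.mem_filter.mpr ⟨hs, by simp⟩
      have hv : ({ items := innerL ps f } : PySem.Dict String Int).insert s ((ps.count (f, s) : Int) + 1) =
          PySem.Dict.mk (List.map
            (fun q => if q.2 == s then (s, (ps.count (f, s) : Int) + 1) else (q.2, (ps.count q : Int)))
            (PySem.List.dedup (List.filter (fun p => p.1 == f) ps))) := by
        apply PySem.Dict.ext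
        rw [PySem.Dict.items_insert_of_contains _ _ (by rw [inner_contains]; simp [hs])]
        show List.map _ (List.map _ _) = _
        rw [List.map_map]
        rfl
      have hinner : innerL (ps ++ [(f, s)]) f = List.map
          (fun q => if q.2 == s then (s, (ps.count (f, s) : Int) + 1) else (q.2, (ps.count q : Int)))
          (PySem.List.dedup (List.filter (fun p => p.1 == f) ps)) := by
        unfold innerL
        rw [List.filter_append, show List.filter (fun p => p.1 == f) [(f, s)] = [(f, s)] from by simp,
          dedup_snoc, if_pos hmemf]
        apply List.map_congr_left
        intro q hq
        have hqf : q.1 = f := fst_of_mem_filter ((PySem.List.mem_dedup _ _).mp hq)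
        by_cases hq2 : q.2 = s
        · have hqp : q = (f, s) := Prod.ext hqf hq2
          subst hqp
          simp [List.count_append]
        · have hqp : q ≠ (f, s) := fun e => hq2 (by rw [e])
          rw [count_snoc_ne hqp]
          simp [hq2]
      apply PySem.Dict.ext
      rw [hv, PySem.Dict.items_insert_of_contains _ _ (by rw [contains_canonD]; simp [hf])]
      show List.map _ (List.map _ _) = _
      rw [List.map_map]
      simp only [canonD, hK]
      apply List.map_congr_left
      intro f' hf'
      by_cases he : f' = f
      · subst he
        simp [hinner]
      · simp [he,
          innerL_snoc_ne (show ((f, s) : String × String).1 ≠ f' from fun e => he e.symm)]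
    · -- new second word under an existing first
      simp only [decide_eq_false hs, Bool.false_eq_true, if_false]
      have hpf : (f, s) ∉ List.filter (fun p => p.1 == f) ps := fun hm => hs (List.mem_filter.mp hm).1
      have hv : ({ items := innerL ps f } : PySem.Dict String Int).insert s 1 =
          PySem.Dict.mk (innerL ps f ++ [(s, 1)]) := by
        apply PySem.Dict.ext
        rw [PySem.Dict.items_insert_of_not_contains _ _ (by rw [inner_contains]; simp [hs])]
      have hinner : innerL (ps ++ [(f, s)]) f = innerL ps f ++ [(s, 1)] := by
        unfold innerL
        rw [List.filter_append, show List.filter (fun p => p.1 == f) [(f, s)] = [(f, s)] from by simp,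
          dedup_snoc, if_neg hpf, List.map_append]
        congr 1
        · apply List.map_congr_left
          intro q hq
          have hqp : q ≠ (f, s) := fun e => hpf (e ▸ (PySem.List.mem_dedup _ _).mp hq)
          rw [count_snoc_ne hqp]
        · simp [List.count_append, List.count_eq_zero.mpr hs]
      apply PySem.Dict.ext
      rw [hv, PySem.Dict.items_insert_of_contains _ _ (by rw [contains_canonD]; simp [hf])]
      show List.map _ (List.map _ _) = _
      rw [List.map_map]
      simp only [canonD, hK]
      apply List.map_congr_left
      intro f' hf'
      by_cases he : f' = f
      · subst he
        simp [hinner]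
      · simp [he,
          innerL_snoc_ne (show ((f, s) : String × String).1 ≠ f' from fun e => he e.symm)]
  · -- new first word
    simp only [decide_eq_false hf, Bool.false_eq_true, if_false]
    apply PySem.Dict.ext
    rw [PySem.Dict.items_insert_of_not_contains _ _ (by rw [contains_canonD]; simp [hf])]
    have hK : PySem.List.dedup ((ps ++ [(f, s)]).map (fun p => p.1)) =
        PySem.List.dedup (ps.map fun p => p.1) ++ [f] := by
      rw [List.map_append]
      show PySem.List.dedup (_ ++ [f]) = _
      rw [dedup_snoc]; simp [hf]
    have hp : (f, s) ∉ ps := fun hmem => hf (List.mem_map.mpr ⟨(f, s), hmem, rfl⟩)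
    have hfil : ps.filter (fun p => p.1 == f) = [] := by
      rw [List.filter_eq_nil_iff]; intro q hq e; exact hf (List.mem_map.mpr ⟨q, hq, eq_of_beq e⟩)
    have hinner : innerL (ps ++ [(f, s)]) f = [(s, 1)] := by
      unfold innerL
      rw [List.filter_append, hfil, List.nil_append]
      have : List.filter (fun p => p.1 == f) [(f, s)] = [(f, s)] := by simp
      rw [this]
      have : PySem.List.dedup [(f, s)] = [(f, s)] := by
        simp [PySem.List.dedup_eq_ofList, PySem.Set.ofList_eq_foldl, PySem.Set.add, PySem.Set.contains]
      rw [this]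
      simp [List.count_append, List.count_eq_zero.mpr hp]
    simp only [canonD, List.map_append, List.map_cons, List.map_nil]
    rw [dedup_snoc, if_neg hf, List.map_append]
    congr 1
    · apply List.map_congr_left
      intro f' hf'
      have hne : f' ≠ f := fun e => hf (e ▸ (PySem.List.mem_dedup _ _).mp hf')
      rw [innerL_snoc_ne (show (f, s).1 ≠ f' from fun e => hne e.symm)]
    · simp only [List.map_cons, List.map_nil, hinner]
      rfl

theorem bigram_foldl_eq_canonD (ps : List (String × String)) :
    ps.foldl (fun d p => bigramStepA d p.1 p.2) PySem.Dict.empty = canonD ps := by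
  induction ps using List.reverseRecOn with
  | nil => rfl
  | append_singleton ps p ih =>
    rw [List.foldl_append, List.foldl_cons, List.foldl_nil, ih, step_canonD]

theorem range_map_eq_zip (lst : List String) :
    (PySem.List.pyRange 0 ((lst.length : Int) - 1) 1).map
        (fun i => (PySem.List.pyGetD lst i "", PySem.List.pyGetD lst (i + 1) "")) =
      lst.zip lst.tail := by
  cases lst with
  | nil => rfl
  | cons a t =>
    have h : (((a :: t).length : Int) - 1) = ((t.length : Nat) : Int) := by
      simp
    rw [h, PySem.List.pyRange_zero_natCast, List.map_map]
    apply List.ext_getElem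
    · simp
    · intro i h1 h2
      have hi : ((i : Int) + 1) = ((i + 1 : Nat) : Int) := by push_cast; ring
      simp only [List.getElem_map, List.getElem_range, Function.comp_apply, hi,
        PySem.List.pyGetD_natCast, List.getElem_zip]
      simp at h2
      rw [List.getD_eq_getElem _ _ (by simp; omega), List.getD_eq_getElem _ _ (by simp; omega)]
      simp

theorem foldl_index_eq_foldl_zip (lst : List String)
    (init : PySem.Dict String (PySem.Dict String Int)) :
    (PySem.List.pyRange 0 ((lst.length : Int) - 1) 1).foldl
        (fun d i =>
          bigramStepA d (PySem.List.pyGetD lst i "") (PySem.List.pyGetD lst (i + 1) "")) init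
      = (lst.zip lst.tail).foldl (fun d p => bigramStepA d p.1 p.2) init := by
  conv_rhs => rw [← range_map_eq_zip lst]
  rw [List.foldl_map]

-- ===== VERDICT (by name: the statement is the Claim_ definition above) =====
theorem bigram_count_spec : Claim_equal_bigram_count := by
  intro s _
  simp only [Spec_bigram_count, bigram_count, bigram_count_alt, PySem.List.slice_from_one]
  rw [foldl_index_eq_foldl_zip, bigram_foldl_eq_canonD]
  simp [canonD, innerL, List.map_map, Function.comp_def]
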